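-- pv_equiv track=rewrite | github.com/tuenguyenprograming1003/Game-8Rocks | Alg/dls.py | dls_target
-- ===== SOURCE A (Python) =====
-- n = 8
--
-- def dls_target(tg, limit):
--     tg_t=tuple(tg)
--     start=tuple()
--     stack=[(start,0)]
--     par={start:None}
--     while stack:
--         st,d=stack.pop()
--         if st==tg_t: break
--         if d==limit: continue
--         r=len(st)
--         for c in range(n):
--             if c in st: continue
--             ns=tuple(list(st)+[c])
--             if ns not in par:
--                 par[ns]=st
--                 stack.append((ns,d+1))
--                 if ns==tg_t:
--                     stack.clear()
--                     break
--     if tg_t not in par: return []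
--     path=[]
--     cur=tg_t
--     while cur is not None:
--         s=[None]*n
--         for i,v in enumerate(cur): s[i]=v
--         path.append(s)
--         cur=par.get(cur)
--     return path[::-1]
-- ===== SOURCE B (Python) =====
-- n = 8
--
-- def dls_target(tg, limit):
--     if len(set(tg)) != len(tg) or not all(0 <= v < n for v in tg):
--         return []
--     if 0 <= limit < len(tg):
--         return []
--     return [list(tg[:i]) + [None] * (n - i) for i in range(len(tg) + 1)]
-- ===== Notes on version B (the rewrite author's own statement) =====
-- stated objective: faster
-- what changed: B replaces the depth-limited DFS over the space of partial permutations (parent map plus backtracking path reconstruction) by a direct check that tg is a sequence of distinct values in range(8) within the depth limit, emitting the successive prefixes of tg directly.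
import Mathlib
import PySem

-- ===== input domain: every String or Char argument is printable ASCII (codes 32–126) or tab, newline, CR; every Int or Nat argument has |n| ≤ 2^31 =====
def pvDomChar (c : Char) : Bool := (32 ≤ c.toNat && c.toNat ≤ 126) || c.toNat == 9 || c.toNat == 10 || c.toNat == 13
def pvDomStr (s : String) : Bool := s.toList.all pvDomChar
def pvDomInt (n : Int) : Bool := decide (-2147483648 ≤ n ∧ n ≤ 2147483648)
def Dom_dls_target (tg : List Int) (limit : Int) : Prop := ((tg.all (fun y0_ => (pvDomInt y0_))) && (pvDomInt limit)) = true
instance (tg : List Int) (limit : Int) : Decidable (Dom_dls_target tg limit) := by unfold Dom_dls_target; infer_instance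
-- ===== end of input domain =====

-- B replaces A's depth-limited DFS over partial permutations by a direct validity check plus
-- direct emission of the successive prefixes of tg (objective: faster).

-- ===== PORT A =====
-- parent dict: key = tuple (partial permutation), value = parent tuple or Python None.
-- Ported as Std.HashMap: A only ever point-reads (in / get) and point-inserts fresh keys into
-- par and never iterates it, so insertion order is unobservable and a hash map is an exact
-- port of the Python dict here (an association list would make small searches unevaluably slow).
abbrev DlsPar := Std.HashMap (List Int) (Option (List Int))

-- the inner `for c in range(n)` loop of A; on `ns == tg_t` it performs stack.clear() and breaks.
-- The stack is kept top-at-head (Python appends/pops at the right end; same LIFO order).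
def dlsExpand (tg st : List Int) (d : Int) :
    List Int → DlsPar → List (List Int × Int) → DlsPar × List (List Int × Int)
  | [], par, stack => (par, stack)
  | c :: cs, par, stack =>
    if c ∈ st then dlsExpand tg st d cs par stack
    else
      if par.contains (st ++ [c]) then dlsExpand tg st d cs par stack
      else
        let par' := par.insert (st ++ [c]) (some st)
        if st ++ [c] = tg then (par', [])
        else dlsExpand tg st d cs par' ((st ++ [c], d + 1) :: stack)

-- the `while stack` loop of A; the fuel only makes the loop total (43046721 = 9^8 is proved
-- sufficient below: each iteration pops once and every push adds a fresh key to par)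
def dlsLoop (tg : List Int) (limit : Int) :
    Nat → List (List Int × Int) → DlsPar → DlsPar
  | 0, _, par => par
  | _ + 1, [], par => par
  | fuel + 1, (st, d) :: rest, par =>
    if st = tg then par
    else if d = limit then dlsLoop tg limit fuel rest par
    else
      let r := dlsExpand tg st d (PySem.List.pyRange 0 8) par rest
      dlsLoop tg limit fuel r.2 r.1

-- s[i] = v  (exact for 0 ≤ i < len s; Python raises IndexError past the end — unreachable here,
-- every key of par has length ≤ 8)
def dlsSetIdx : List (Option Int) → Nat → Int → List (Option Int)
  | [], _, _ => []
  | _ :: s, 0, v => some v :: s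
  | x :: s, i + 1, v => x :: dlsSetIdx s i v

-- s = [None]*n; for i, v in enumerate(cur): s[i] = v
def dlsFill (cur : List Int) : List (Option Int) :=
  (PySem.List.enumerate cur 0).foldl (fun s p => dlsSetIdx s p.1.toNat p.2) (List.replicate 8 none)

-- the backtracking `while cur is not None` loop; fuel (length tg + 1) only makes it total
def dlsPath (par : DlsPar) : Nat → List Int → List (List (Option Int)) → List (List (Option Int))
  | 0, _, path => path
  | fuel + 1, cur, path =>
    match par.get? cur with
    | some (some nxt) => dlsPath par fuel nxt (path ++ [dlsFill cur])
    | _ => path ++ [dlsFill cur]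

def dls_target (tg : List Int) (limit : Int) : List (List (Option Int)) :=
  let par := dlsLoop tg limit 43046721 [([], 0)] ((∅ : DlsPar).insert [] none)
  if par.contains tg then (dlsPath par (tg.length + 1) tg []).reverse else []

-- ===== PORT B =====
def dls_target_alt (tg : List Int) (limit : Int) : List (List (Option Int)) :=
  if (PySem.Set.ofList tg).length ≠ tg.length ∨ ¬ (tg.all (fun v => decide (0 ≤ v ∧ v < 8)) = true) then []
  else if 0 ≤ limit ∧ limit < (tg.length : Int) then []
  else (PySem.List.pyRange 0 ((tg.length : Int) + 1)).map
    (fun i => (PySem.List.slice tg none (some i)).map some ++ List.replicate (8 - i.toNat) none)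

-- ===== PRECONDITION & SPEC =====
def Spec_dls_target (tg : List Int) (limit : Int) (out : List (List (Option Int))) : Prop := out = dls_target_alt tg limit
instance (tg : List Int) (limit : Int) (out : List (List (Option Int))) : Decidable (Spec_dls_target tg limit out) := by unfold Spec_dls_target; infer_instance

-- ===== CLAIM (what is proved, stated in full; the proofs are below) =====
def Claim_equal_dls_target : Prop := ∀ (tg : List Int) (limit : Int), Dom_dls_target tg limit → Spec_dls_target tg limit (dls_target tg limit)

-- ===== LEMMAS AND PROOFS =====

-- bridge lemmas for the Std.HashMap operations the ports use
theorem dls_nodup_keys (par : DlsPar) : par.keys.Nodup :=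
  (Std.HashMap.distinct_keys).imp (by intro a b hab; simpa using hab)

theorem dls_get?_none_iff (par : DlsPar) (k : List Int) :
    par.get? k = none ↔ k ∉ par.keys := by
  rw [Std.HashMap.get?_eq_getElem?, Std.HashMap.mem_keys, Std.HashMap.mem_iff_contains,
    Std.HashMap.contains_eq_isSome_getElem?]
  cases par[k]? <;> simp

theorem dls_get?_insert (par : DlsPar) (k k' : List Int) (v : Option (List Int)) :
    (par.insert k v).get? k' = if k' = k then some v else par.get? k' := by
  rw [Std.HashMap.get?_eq_getElem?, Std.HashMap.get?_eq_getElem?, Std.HashMap.getElem?_insert]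
  by_cases h : k' = k
  · simp [h]
  · simp [h, Ne.symm h]

theorem dls_get?_insert_self (par : DlsPar) (k : List Int) (v : Option (List Int)) :
    (par.insert k v).get? k = some v := by
  rw [dls_get?_insert, if_pos rfl]

theorem dls_mem_keys_insert (par : DlsPar) (k k' : List Int) (v : Option (List Int)) :
    k' ∈ (par.insert k v).keys ↔ k' = k ∨ k' ∈ par.keys := by
  rw [Std.HashMap.mem_keys, Std.HashMap.mem_insert, Std.HashMap.mem_keys, beq_iff_eq]
  constructor
  · rintro (rfl | h); exacts [Or.inl rfl, Or.inr h]
  · rintro (rfl | h); exacts [Or.inl rfl, Or.inr h]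

theorem dls_contains_iff_mem_keys (par : DlsPar) (k : List Int) :
    par.contains k = true ↔ k ∈ par.keys := by
  rw [Std.HashMap.mem_keys, Std.HashMap.mem_iff_contains]

theorem dls_size_insert (par : DlsPar) (k : List Int) (v : Option (List Int)) :
    (par.insert k v).size = if par.contains k = true then par.size else par.size + 1 := by
  rw [Std.HashMap.size_insert]
  by_cases h : k ∈ par
  · rw [if_pos h, if_pos (Std.HashMap.mem_iff_contains.1 h)]
  · rw [if_neg h, if_neg (fun hc => h (Std.HashMap.mem_iff_contains.2 hc))]

def dlsValid (k : List Int) : Prop := k.Nodup ∧ ∀ v ∈ k, 0 ≤ v ∧ v < 8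

def dlsInv (limit : Int) (par : DlsPar) : Prop :=
  par.keys.Nodup ∧ par.get? [] = some none ∧
  ∀ k ∈ par.keys, k ≠ [] →
    par.get? k = some (some k.dropLast) ∧ k.dropLast ∈ par.keys ∧ dlsValid k ∧
    (0 ≤ limit → (k.length : Int) ≤ limit)

def dlsStackOK (limit : Int) (par : DlsPar) (stack : List (List Int × Int)) : Prop :=
  ∀ p d, (p, d) ∈ stack → p ∈ par.keys ∧ d = (p.length : Int) ∧ dlsValid p ∧ (0 ≤ limit → d ≤ limit)

def dlsEnc (k : List Int) : Nat := k.foldl (fun a v => a * 9 + (v.toNat + 1)) 0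

theorem dlsEnc_concat (k : List Int) (v : Int) :
    dlsEnc (k ++ [v]) = dlsEnc k * 9 + (v.toNat + 1) := by
  simp [dlsEnc, List.foldl_append]

theorem dlsEnc_aux_lt (k : List Int) : ∀ a : Nat, (∀ v ∈ k, 0 ≤ v ∧ v < 8) →
    k.foldl (fun a v => a * 9 + (v.toNat + 1)) a < (a + 1) * 9 ^ k.length := by
  induction k with
  | nil => intro a _; simp
  | cons v k ih =>
    intro a h
    have hv := h v (by simp)
    have hvt : v.toNat < 8 := by omega
    have h1 := ih (a * 9 + (v.toNat + 1)) (fun x hx => h x (by simp [hx]))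
    calc (v :: k).foldl (fun a v => a * 9 + (v.toNat + 1)) a
        = k.foldl (fun a v => a * 9 + (v.toNat + 1)) (a * 9 + (v.toNat + 1)) := by simp
      _ < (a * 9 + (v.toNat + 1) + 1) * 9 ^ k.length := h1
      _ ≤ ((a + 1) * 9) * 9 ^ k.length := by
          apply Nat.mul_le_mul_right; omega
      _ = (a + 1) * 9 ^ (v :: k).length := by
          simp [List.length_cons, pow_succ]; ring

theorem dlsEnc_lt (k : List Int) (h : ∀ v ∈ k, 0 ≤ v ∧ v < 8) (hl : k.length ≤ 8) :
    dlsEnc k < 43046721 := by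
  have := dlsEnc_aux_lt k 0 h
  have h2 : (9:Nat) ^ k.length ≤ 9 ^ 8 := Nat.pow_le_pow_right (by norm_num) hl
  calc dlsEnc k < 1 * 9 ^ k.length := by simpa [dlsEnc] using this
    _ ≤ 9 ^ 8 := by simpa using h2
    _ ≤ 43046721 := by norm_num

theorem dlsEnc_inj : ∀ k1 k2 : List Int, (∀ v ∈ k1, 0 ≤ v ∧ v < 8) → (∀ v ∈ k2, 0 ≤ v ∧ v < 8) →
    dlsEnc k1 = dlsEnc k2 → k1 = k2 := by
  intro k1
  induction k1 using List.reverseRecOn with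
  | nil =>
    intro k2 _ h2 he
    cases k2 using List.reverseRecOn with
    | nil => rfl
    | append_singleton bs b =>
      rw [dlsEnc_concat, show dlsEnc ([]:List Int) = 0 from rfl] at he
      have hb := h2 b (by simp)
      omega
  | append_singleton as a ih =>
    intro k2 h1 h2 he
    cases k2 using List.reverseRecOn with
    | nil =>
      rw [dlsEnc_concat, show dlsEnc ([]:List Int) = 0 from rfl] at he
      have hb := h1 a (by simp)
      omega
    | append_singleton bs b =>
      rw [dlsEnc_concat, dlsEnc_concat] at he
      have ha := h1 a (by simp)
      have hb := h2 b (by simp)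
      have hat : a.toNat < 8 := by omega
      have hbt : b.toNat < 8 := by omega
      have h3 : dlsEnc as = dlsEnc bs ∧ a.toNat = b.toNat := by omega
      have hav : a = b := by omega
      have := ih bs (fun x hx => h1 x (by simp [hx])) (fun x hx => h2 x (by simp [hx])) h3.1
      rw [this, hav]

theorem dlsValid_len_le (k : List Int) (h : dlsValid k) : k.length ≤ 8 := by
  have hsub : k.toFinset ⊆ Finset.Icc (0:Int) 7 := by
    intro x hx
    have := h.2 x (by simpa using hx)
    simp [Finset.mem_Icc]; omega
  have hcard := Finset.card_le_card hsub
  rw [List.toFinset_card_of_nodup h.1] at hcard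
  simpa [Int.card_Icc] using hcard

theorem dls_keys_bound (ks : List (List Int)) (hn : ks.Nodup) (hv : ∀ k ∈ ks, dlsValid k) :
    ks.length ≤ 43046721 := by
  have hmapnd : (ks.map dlsEnc).Nodup := by
    apply hn.map_on
    intro x hx y hy hxy
    exact dlsEnc_inj x y (hv x hx).2 (hv y hy).2 hxy
  have hsub : (ks.map dlsEnc).toFinset ⊆ Finset.range 43046721 := by
    intro x hx
    simp at hx
    obtain ⟨k, hk, rfl⟩ := hx
    simp
    exact dlsEnc_lt k (hv k hk).2 (dlsValid_len_le k (hv k hk))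
  have := Finset.card_le_card hsub
  rw [List.toFinset_card_of_nodup hmapnd, Finset.card_range] at this
  simpa using this

theorem dls_get?_of_mem_keys {par : DlsPar} {k : List Int} (h : k ∈ par.keys) : ∃ v, par.get? k = some v := by
  cases hg : par.get? k with
  | none => exact absurd ((dls_get?_none_iff par k).1 hg) (by simp [h])
  | some v => exact ⟨v, rfl⟩

theorem dls_mem_keys_of_get? {par : DlsPar} {k : List Int} {v} (h : par.get? k = some v) : k ∈ par.keys := by
  by_contra hk
  rw [← dls_get?_none_iff] at hk
  rw [hk] at h
  cases h

theorem dlsValid_nil : dlsValid [] := by simp [dlsValid]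

theorem dlsValid_concat {st : List Int} {c : Int} (h : dlsValid st) (hc0 : 0 ≤ c) (hc8 : c < 8)
    (hcin : c ∉ st) : dlsValid (st ++ [c]) := by
  refine ⟨?_, ?_⟩
  · rw [List.nodup_append]
    refine ⟨h.1, List.nodup_singleton c, ?_⟩
    intro a ha b hb
    rw [List.mem_singleton] at hb
    subst hb
    exact fun hab => hcin (hab ▸ ha)
  · intro v hv
    rcases (by simpa using hv) with hv | rfl
    · exact h.2 v hv
    · exact ⟨hc0, hc8⟩

theorem dlsExpand_spec (tg st : List Int) (d limit : Int) :
    ∀ (cs : List Int) (par : DlsPar) (stack : List (List Int × Int)),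
    (∀ c ∈ cs, 0 ≤ c ∧ c < 8) →
    st ∈ par.keys → dlsValid st → d = (st.length : Int) → (0 ≤ limit → d + 1 ≤ limit) →
    dlsInv limit par → dlsStackOK limit par stack →
    (∀ k v, par.get? k = some v → (dlsExpand tg st d cs par stack).1.get? k = some v) ∧
    dlsInv limit (dlsExpand tg st d cs par stack).1 ∧
    dlsStackOK limit (dlsExpand tg st d cs par stack).1 (dlsExpand tg st d cs par stack).2 ∧
    ((tg ∈ (dlsExpand tg st d cs par stack).1.keys ∧ (dlsExpand tg st d cs par stack).2 = []) ∨
      ((dlsExpand tg st d cs par stack).1.size + stack.length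
          = par.size + (dlsExpand tg st d cs par stack).2.length ∧
        ∃ pre, (dlsExpand tg st d cs par stack).2 = pre ++ stack)) ∧
    (tg ∈ (dlsExpand tg st d cs par stack).1.keys ∨
      ∀ c ∈ cs, c ∉ st → st ++ [c] ∈ (dlsExpand tg st d cs par stack).1.keys) ∧
    (tg ∈ (dlsExpand tg st d cs par stack).1.keys ∨
      ∀ k ∈ (dlsExpand tg st d cs par stack).1.keys,
        k ∈ par.keys ∨ (k, (k.length : Int)) ∈ (dlsExpand tg st d cs par stack).2) := by
  intro cs
  induction cs with
  | nil =>
    intro par stack hcs hst hstv hd hdl hinv hsok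
    refine ⟨fun k v h => h, hinv, hsok, Or.inr ⟨by simp [dlsExpand], ⟨[], by simp [dlsExpand]⟩⟩,
      Or.inr (by simp), Or.inr (fun k hk => Or.inl (by simpa [dlsExpand] using hk))⟩
  | cons c cs ih =>
    intro par stack hcs hst hstv hd hdl hinv hsok
    have hc := hcs c (by simp)
    by_cases hcin : c ∈ st
    · have heq : dlsExpand tg st d (c :: cs) par stack = dlsExpand tg st d cs par stack := by
        simp [dlsExpand, hcin]
      rw [heq]
      obtain ⟨m, i, s, a, comp, nk⟩ := ih par stack (fun x hx => hcs x (by simp [hx])) hst hstv hd hdl hinv hsok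
      refine ⟨m, i, s, a, ?_, nk⟩
      rcases comp with h | h
      · exact Or.inl h
      · exact Or.inr (fun c' hc' hcn => by
          rcases (by simpa using hc') with rfl | hc' <;> [exact absurd hcin hcn; exact h c' hc' hcn])
    · by_cases hcon : par.contains (st ++ [c]) = true
      · have heq : dlsExpand tg st d (c :: cs) par stack = dlsExpand tg st d cs par stack := by
          simp [dlsExpand, hcin, hcon]
        rw [heq]
        obtain ⟨m, i, s, a, comp, nk⟩ := ih par stack (fun x hx => hcs x (by simp [hx])) hst hstv hd hdl hinv hsok
        have hmemc : st ++ [c] ∈ par.keys := (dls_contains_iff_mem_keys par _).1 hcon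
        refine ⟨m, i, s, a, ?_, nk⟩
        rcases comp with h | h
        · exact Or.inl h
        · refine Or.inr (fun c' hc' hcn => ?_)
          rcases (by simpa using hc') with rfl | hc'
          · obtain ⟨v, hv⟩ := dls_get?_of_mem_keys hmemc
            exact dls_mem_keys_of_get? (m _ _ hv)
          · exact h c' hc' hcn
      · -- fresh key inserted
        have hnsval : dlsValid (st ++ [c]) := dlsValid_concat hstv hc.1 hc.2 hcin
        have hnsnotin : st ++ [c] ∉ par.keys := fun hmem =>
          hcon ((dls_contains_iff_mem_keys par _).2 hmem)
        have hnsne : st ++ [c] ≠ [] := by simp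
        have hdrop : (st ++ [c]).dropLast = st := by simp
        -- the inserted dict satisfies the invariant
        have hinv' : dlsInv limit (par.insert (st ++ [c]) (some st)) := by
          refine ⟨dls_nodup_keys _, ?_, ?_⟩
          · rw [dls_get?_insert]
            simp only [if_neg (by simp : ([]:List Int) ≠ st ++ [c])]
            exact hinv.2.1
          · intro k hk hkne
            rcases (dls_mem_keys_insert _ _ _ _).1 hk with rfl | hk'
            · refine ⟨by rw [dls_get?_insert, if_pos rfl, hdrop], ?_, hnsval, ?_⟩
              · rw [hdrop]; exact (dls_mem_keys_insert _ _ _ _).2 (Or.inr hst)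
              · intro hl
                have := hdl hl
                simp only [List.length_append, List.length_cons, List.length_nil]
                push_cast
                omega
            · have hkne2 : k ≠ st ++ [c] := fun h => hnsnotin (h ▸ hk')
              obtain ⟨g, gd, gv, gl⟩ := hinv.2.2 k hk' hkne
              refine ⟨by rw [dls_get?_insert, if_neg hkne2]; exact g, ?_, gv, gl⟩
              exact (dls_mem_keys_insert _ _ _ _).2 (Or.inr gd)
        have hmono' : ∀ k v, par.get? k = some v →
            (par.insert (st ++ [c]) (some st)).get? k = some v := by
          intro k v hv
          have : k ≠ st ++ [c] := fun h => hnsnotin (h ▸ dls_mem_keys_of_get? hv)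
          rw [dls_get?_insert, if_neg this]
          exact hv
        have hnsmem : st ++ [c] ∈ (par.insert (st ++ [c]) (some st)).keys :=
          (dls_mem_keys_insert _ _ _ _).2 (Or.inl rfl)
        have hsize' : (par.insert (st ++ [c]) (some st)).size = par.size + 1 := by
          rw [dls_size_insert, if_neg (by simp [hcon])]
        by_cases htg : st ++ [c] = tg
        · have heq : dlsExpand tg st d (c :: cs) par stack
              = (par.insert (st ++ [c]) (some st), []) := by
            rw [dlsExpand, if_neg hcin, if_neg hcon, if_pos htg]
          rw [heq]
          refine ⟨hmono', hinv', by intro p dd h; simp at h, Or.inl ⟨htg ▸ hnsmem, rfl⟩,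
            Or.inl (htg ▸ hnsmem), Or.inl (htg ▸ hnsmem)⟩
        · have heq : dlsExpand tg st d (c :: cs) par stack
              = dlsExpand tg st d cs (par.insert (st ++ [c]) (some st))
                  ((st ++ [c], d + 1) :: stack) := by
            rw [dlsExpand, if_neg hcin, if_neg hcon, if_neg htg]
          rw [heq]
          have hsok' : dlsStackOK limit (par.insert (st ++ [c]) (some st))
              ((st ++ [c], d + 1) :: stack) := by
            intro p dd hp
            rcases (by simpa using hp) with ⟨rfl, rfl⟩ | hp'
            · refine ⟨hnsmem, by rw [hd]; simp, hnsval, fun hl => hdl hl⟩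
            · obtain ⟨g1, g2, g3, g4⟩ := hsok p dd hp'
              exact ⟨(dls_mem_keys_insert _ _ _ _).2 (Or.inr g1), g2, g3,
                fun hl => by have := g4 hl; have := hdl hl; omega⟩
          obtain ⟨m, i, s, a, comp, nk⟩ := ih (par.insert (st ++ [c]) (some st))
            ((st ++ [c], d + 1) :: stack) (fun x hx => hcs x (by simp [hx]))
            (dls_mem_keys_of_get? (hmono' st _ (dls_get?_of_mem_keys hst).choose_spec))
            hstv hd hdl hinv' hsok'
          refine ⟨fun k v hv => m k v (hmono' k v hv), i, s, ?_, ?_, ?_⟩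
          · rcases a with h | ⟨hsz, pre, hpre⟩
            · exact Or.inl h
            · refine Or.inr ⟨by simp at hsz; omega, pre ++ [(st ++ [c], d + 1)], by
                simp [hpre]⟩
          · rcases comp with h | h
            · exact Or.inl h
            · refine Or.inr (fun c' hc' hcn => ?_)
              rcases (by simpa using hc') with rfl | hc'
              · obtain ⟨v, hv⟩ := dls_get?_of_mem_keys hnsmem
                exact dls_mem_keys_of_get? (m _ _ hv)
              · exact h c' hc' hcn
          · rcases a with htgm | ⟨_, pre, hpre⟩
            · exact Or.inl htgm.1
            rcases nk with h | h
            · exact Or.inl h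
            · refine Or.inr (fun k hk => ?_)
              rcases h k hk with hk' | hk'
              · rcases (dls_mem_keys_insert _ _ _ _).1 hk' with rfl | hk''
                · refine Or.inr ?_
                  rw [hpre]
                  have hlen : ((st ++ [c]).length : Int) = d + 1 := by
                    rw [hd]; simp
                  rw [hlen]
                  simp
                · exact Or.inl hk''
              · exact Or.inr hk'

def dlsJ (tg : List Int) (limit : Int) (par : DlsPar) (stack : List (List Int × Int)) : Prop :=
  tg ∈ par.keys ∨ ∀ k ∈ par.keys, k ≠ tg → (k.length : Int) ≠ limit →
    ((k, (k.length : Int)) ∈ stack ∨ ∀ c : Int, 0 ≤ c → c < 8 → c ∉ k → k ++ [c] ∈ par.keys)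

theorem dlsLoop_nil (tg : List Int) (limit : Int) (fuel : Nat) (par : DlsPar) :
    dlsLoop tg limit fuel [] par = par := by
  cases fuel <;> rfl

theorem dls_size_eq (par : DlsPar) : par.size = par.keys.length :=
  Std.HashMap.length_keys.symm

theorem dls_size_bound (limit : Int) (par : DlsPar) (hinv : dlsInv limit par) :
    par.size ≤ 43046721 := by
  rw [dls_size_eq]
  apply dls_keys_bound _ hinv.1
  intro k hk
  by_cases hk0 : k = []
  · subst hk0; exact ⟨List.nodup_nil, by simp⟩
  · exact (hinv.2.2 k hk hk0).2.2.1

theorem dlsLoop_spec (tg : List Int) (limit : Int) :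
    ∀ (fuel : Nat) (stack : List (List Int × Int)) (par : DlsPar),
    dlsInv limit par → dlsStackOK limit par stack → dlsJ tg limit par stack →
    stack.length + (43046721 - par.size) ≤ fuel →
    (∀ k v, par.get? k = some v → (dlsLoop tg limit fuel stack par).get? k = some v) ∧
    dlsInv limit (dlsLoop tg limit fuel stack par) ∧
    (tg ∈ (dlsLoop tg limit fuel stack par).keys ∨
      ∀ k ∈ (dlsLoop tg limit fuel stack par).keys, k ≠ tg → (k.length : Int) ≠ limit →
        ∀ c : Int, 0 ≤ c → c < 8 → c ∉ k → k ++ [c] ∈ (dlsLoop tg limit fuel stack par).keys) := by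
  intro fuel
  induction fuel with
  | zero =>
    intro stack par hinv hsok hJ hfuel
    have hstack : stack = [] := by
      cases stack with
      | nil => rfl
      | cons a s => simp at hfuel
    subst hstack
    rw [dlsLoop_nil]
    refine ⟨fun k v h => h, hinv, ?_⟩
    rcases hJ with h | h
    · exact Or.inl h
    · refine Or.inr (fun k hk hkt hkl c hc0 hc8 hcn => ?_)
      rcases h k hk hkt hkl with h' | h'
      · simp at h'
      · exact h' c hc0 hc8 hcn
  | succ fuel ih =>
    intro stack par hinv hsok hJ hfuel
    cases stack with
    | nil =>
      rw [dlsLoop_nil]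
      refine ⟨fun k v h => h, hinv, ?_⟩
      rcases hJ with h | h
      · exact Or.inl h
      · refine Or.inr (fun k hk hkt hkl c hc0 hc8 hcn => ?_)
        rcases h k hk hkt hkl with h' | h'
        · simp at h'
        · exact h' c hc0 hc8 hcn
    | cons hd rest =>
      obtain ⟨st, d⟩ := hd
      obtain ⟨hstmem, hstd, hstv, hstl⟩ := hsok st d (by simp)
      by_cases hst : st = tg
      · have heq : dlsLoop tg limit (fuel + 1) ((st, d) :: rest) par = par := by
          rw [dlsLoop, if_pos hst]
        rw [heq]
        exact ⟨fun k v h => h, hinv, Or.inl (hst ▸ hstmem)⟩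
      · by_cases hdlim : d = limit
        · have heq : dlsLoop tg limit (fuel + 1) ((st, d) :: rest) par
              = dlsLoop tg limit fuel rest par := by
            rw [dlsLoop, if_neg hst, if_pos hdlim]
          rw [heq]
          apply ih rest par hinv (fun p dd hp => hsok p dd (by simp [hp]))
          · rcases hJ with h | h
            · exact Or.inl h
            · refine Or.inr (fun k hk hkt hkl => ?_)
              rcases h k hk hkt hkl with h' | h'
              · rcases (by simpa using h') with ⟨rfl, hlen⟩ | h''
                · exact absurd (hlen ▸ hdlim ▸ hstd.symm ▸ rfl : (k.length:Int) = limit) hkl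
                · exact Or.inl h''
              · exact Or.inr h'
          · simp at hfuel ⊢; omega
        · have heq : dlsLoop tg limit (fuel + 1) ((st, d) :: rest) par
              = dlsLoop tg limit fuel (dlsExpand tg st d (PySem.List.pyRange 0 8) par rest).2
                  (dlsExpand tg st d (PySem.List.pyRange 0 8) par rest).1 := by
            rw [dlsLoop, if_neg hst, if_neg hdlim]
          rw [heq]
          have hdl1 : 0 ≤ limit → d + 1 ≤ limit := by
            intro hl; have := hstl hl; omega
          have hcs : ∀ c ∈ PySem.List.pyRange 0 8, 0 ≤ c ∧ c < 8 := by
            intro c hc; exact PySem.List.mem_pyRange_one.1 hc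
          obtain ⟨m, i, s, acc, comp, nk⟩ := dlsExpand_spec tg st d limit
            (PySem.List.pyRange 0 8) par rest hcs hstmem hstv hstd hdl1 hinv
            (fun p dd hp => hsok p dd (by simp [hp]))
          set r1 := (dlsExpand tg st d (PySem.List.pyRange 0 8) par rest).1 with hr1
          set stack' := (dlsExpand tg st d (PySem.List.pyRange 0 8) par rest).2 with hstack'
          have hmemmono : ∀ k, k ∈ par.keys → k ∈ r1.keys := by
            intro k hk
            obtain ⟨v, hv⟩ := dls_get?_of_mem_keys hk
            exact dls_mem_keys_of_get? (m k v hv)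
          rcases acc with ⟨htgm, hnil⟩ | ⟨hsz, pre, hpre⟩
          · rw [hnil, dlsLoop_nil]
            exact ⟨m, i, Or.inl htgm⟩
          · have hr1B : r1.size ≤ 43046721 := dls_size_bound limit r1 i
            have hparB : par.size ≤ 43046721 := dls_size_bound limit par hinv
            have hfuel' : stack'.length + (43046721 - r1.size) ≤ fuel := by
              simp at hfuel; omega
            have hJ' : dlsJ tg limit r1 stack' := by
              rcases hJ with h | h
              · exact Or.inl (hmemmono tg h)
              rcases nk with htgm | hnk
              · exact Or.inl htgm
              rcases comp with htgm | hcomp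
              · exact Or.inl htgm
              refine Or.inr (fun k hk hkt hkl => ?_)
              rcases hnk k hk with hkold | hkstack
              · rcases h k hkold hkt hkl with hmemstk | hproc
                · rcases (by simpa using hmemstk) with ⟨rfl, hlen⟩ | h''
                  · refine Or.inr (fun c hc0 hc8 hcn => ?_)
                    exact hcomp c (PySem.List.mem_pyRange_one.2 ⟨hc0, hc8⟩) hcn
                  · refine Or.inl ?_
                    rw [hpre]
                    simp [h'']
                · refine Or.inr (fun c hc0 hc8 hcn => hmemmono _ (hproc c hc0 hc8 hcn))
              · exact Or.inl hkstack
            obtain ⟨m2, i2, j2⟩ := ih stack' r1 i s hJ' hfuel'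
            exact ⟨fun k v hv => m2 k v (m k v hv), i2, j2⟩

theorem dls_complete (tg : List Int) (limit : Int) (par : DlsPar)
    (hinv : dlsInv limit par)
    (hJ : tg ∈ par.keys ∨ ∀ k ∈ par.keys, k ≠ tg → (k.length : Int) ≠ limit →
        ∀ c : Int, 0 ≤ c → c < 8 → c ∉ k → k ++ [c] ∈ par.keys)
    (hv : dlsValid tg) (hl : 0 ≤ limit → (tg.length : Int) ≤ limit) :
    tg ∈ par.keys := by
  rcases hJ with h | h
  · exact h
  have hnil : [] ∈ par.keys := dls_mem_keys_of_get? hinv.2.1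
  have key : ∀ i, i ≤ tg.length → tg.take i ∈ par.keys := by
    intro i
    induction i with
    | zero => intro _; simpa using hnil
    | succ i ihp =>
      intro hle
      have hi : i < tg.length := hle
      have hp := ihp (le_of_lt hi)
      have hkt : tg.take i ≠ tg := by
        intro he
        have := congrArg List.length he
        simp at this
        omega
      have hkl : ((tg.take i).length : Int) ≠ limit := by
        have hlen : (tg.take i).length = i := by simp; omega
        rw [hlen]
        by_cases h0 : 0 ≤ limit
        · have := hl h0; omega
        · omega
      have hc : 0 ≤ tg[i] ∧ tg[i] < 8 := hv.2 _ (List.getElem_mem hi)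
      have hcn : tg[i] ∉ tg.take i := by
        have hsplit : tg.take i ++ tg.drop i = tg := List.take_append_drop i tg
        have hnd : (tg.take i ++ tg.drop i).Nodup := by rw [hsplit]; exact hv.1
        rw [List.nodup_append] at hnd
        intro hmem
        have hmemd : tg[i] ∈ tg.drop i := by
          have h0 : 0 < (tg.drop i).length := by rw [List.length_drop]; omega
          have hg : (tg.drop i)[0]'h0 = tg[i] := by simp [List.getElem_drop]
          rw [← hg]
          exact List.getElem_mem h0
        exact hnd.2.2 _ hmem _ hmemd rfl
      have := h (tg.take i) hp hkt hkl tg[i] hc.1 hc.2 hcn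
      have htake : tg.take (i + 1) = tg.take i ++ [tg[i]] := by
        rw [List.take_add_one, List.getElem?_eq_getElem hi]
        simp
      rw [htake]
      exact this
  have := key tg.length le_rfl
  simpa using this

theorem dlsSetIdx_append (as bs : List (Option Int)) (v : Int) :
    dlsSetIdx (as ++ bs) as.length v = as ++ dlsSetIdx bs 0 v := by
  induction as with
  | nil => simp
  | cons a as ih => simp [dlsSetIdx, ih]

theorem dlsFill_eq (l : List Int) (hl : l.length ≤ 8) :
    dlsFill l = l.map some ++ List.replicate (8 - l.length) none := by
  induction l using List.reverseRecOn with
  | nil => rfl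
  | append_singleton as a ih =>
    have has : as.length + 1 ≤ 8 := by simpa using hl
    have henum : PySem.List.enumerate (as ++ [a]) 0
        = PySem.List.enumerate as 0 ++ [((as.length : Int), a)] := by
      rw [PySem.List.enumerate_append]
      simp [PySem.List.enumerate]
    rw [dlsFill, henum, List.foldl_append]
    have hfold : (PySem.List.enumerate as 0).foldl (fun s p => dlsSetIdx s p.1.toNat p.2)
        (List.replicate 8 none) = dlsFill as := rfl
    rw [hfold, ih (by omega)]
    have hrep : List.replicate (8 - as.length) (none : Option Int)
        = none :: List.replicate (8 - (as.length + 1)) none := by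
      have : 8 - as.length = (8 - (as.length + 1)) + 1 := by omega
      rw [this, List.replicate_succ]
    simp only [List.foldl_cons, List.foldl_nil, Int.toNat_natCast]
    have hlenmap : (as.map (some : Int → Option Int)).length = as.length := by simp
    rw [hrep, ← hlenmap, dlsSetIdx_append]
    simp [dlsSetIdx]

theorem dlsPath_spec (par : DlsPar) (limit : Int) (hinv : dlsInv limit par) :
    ∀ (n : Nat) (p : List Int), p.length = n → p ∈ par.keys → ∀ acc,
      dlsPath par (n + 1) p acc
        = acc ++ ((List.range (n + 1)).map (fun i => dlsFill (p.take i))).reverse := by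
  intro n
  induction n with
  | zero =>
    intro p hlen hmem acc
    have hp : p = [] := List.length_eq_zero_iff.1 hlen
    subst hp
    rw [dlsPath, hinv.2.1]
    simp
  | succ n ihn =>
    intro p hlen hmem acc
    have hpne : p ≠ [] := by intro h; subst h; simp at hlen
    obtain ⟨hg, hgd, _, _⟩ := hinv.2.2 p hmem hpne
    rw [dlsPath, hg]
    show dlsPath par (n + 1) p.dropLast (acc ++ [dlsFill p])
        = acc ++ ((List.range (n + 1 + 1)).map (fun i => dlsFill (p.take i))).reverse
    have hdll : p.dropLast.length = n := by
      rw [List.length_dropLast, hlen]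
      omega
    rw [ihn p.dropLast hdll hgd]
    have htake : ∀ i, i ≤ n → p.dropLast.take i = p.take i := by
      intro i hi
      rw [List.dropLast_eq_take, List.take_take]
      congr 1
      omega
    have hmap : (List.range (n + 1)).map (fun i => dlsFill (p.dropLast.take i))
        = (List.range (n + 1)).map (fun i => dlsFill (p.take i)) := by
      apply List.map_congr_left
      intro i hi
      rw [htake i (by simpa using Nat.lt_succ_iff.1 (List.mem_range.1 hi))]
    rw [hmap]
    have hr : List.range (n + 1 + 1) = List.range (n + 1) ++ [n + 1] := List.range_succ
    rw [hr]
    have hfull : p.take (n + 1) = p := by rw [← hlen]; exact List.take_length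
    simp [hfull]

theorem dls_foldl_add_nodup (xs : List Int) : ∀ s : List Int, (s ++ xs).Nodup →
    List.foldl PySem.Set.add s xs = s ++ xs := by
  induction xs with
  | nil => simp
  | cons x xs ih =>
    intro s hnd
    have hx : x ∉ s := by
      rw [List.nodup_append] at hnd
      intro hmem
      exact hnd.2.2 x hmem x (by simp) rfl
    have hadd : PySem.Set.add s x = s ++ [x] := by
      rw [PySem.Set.add, if_neg]
      simp [hx]
    rw [List.foldl_cons, hadd, ih (s ++ [x]) (by simpa using hnd)]
    simp

theorem dls_setlen_iff (xs : List Int) :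
    (PySem.Set.ofList xs).length = xs.length ↔ xs.Nodup := by
  constructor
  · intro h
    have hnd := PySem.Set.nodup_ofList xs
    have hf : (PySem.Set.ofList xs).toFinset = xs.toFinset := by
      ext y; simp [List.mem_toFinset, PySem.Set.mem_ofList]
    have hc : xs.toFinset.card = xs.length := by
      rw [← hf, List.toFinset_card_of_nodup hnd, h]
    have hml := (Multiset.toFinset_card_eq_card_iff_nodup (m := (xs : Multiset Int))).1
      (by simpa using hc)
    simpa using hml
  · intro h
    have := dls_foldl_add_nodup xs [] (by simpa using h)
    have hofl : PySem.Set.ofList xs = xs := by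
      rw [PySem.Set.ofList]
      simpa [PySem.Set.empty] using this
    rw [hofl]

theorem dls_alt_eq_pos (tg : List Int) (limit : Int) (hval : dlsValid tg)
    (hlim : ¬(0 ≤ limit ∧ limit < (tg.length : Int))) :
    dls_target_alt tg limit =
      (List.range (tg.length + 1)).map
        (fun i => (tg.take i).map some ++ List.replicate (8 - i) none) := by
  rw [dls_target_alt]
  have h1 : ¬((PySem.Set.ofList tg).length ≠ tg.length
      ∨ ¬(tg.all (fun v => decide (0 ≤ v ∧ v < 8)) = true)) := by
    push Not
    refine ⟨(dls_setlen_iff tg).2 hval.1, ?_⟩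
    rw [List.all_eq_true]
    intro v hv
    exact decide_eq_true (hval.2 v hv)
  rw [if_neg h1, if_neg hlim]
  rw [PySem.List.pyRange_one]
  have hn : ((tg.length : Int) + 1 - 0).toNat = tg.length + 1 := by omega
  rw [hn, List.map_map]
  apply List.map_congr_left
  intro i hi
  simp only [Function.comp_apply]
  have hz : (0 : Int) + (i : Int) = (i : Int) := by ring
  rw [hz, PySem.List.slice_to_natCast]
  simp

theorem dls_alt_eq_neg (tg : List Int) (limit : Int)
    (h : ¬(dlsValid tg ∧ ¬(0 ≤ limit ∧ limit < (tg.length : Int)))) :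
    dls_target_alt tg limit = [] := by
  rw [dls_target_alt]
  by_cases hval : dlsValid tg
  · have hlim : 0 ≤ limit ∧ limit < (tg.length : Int) := by tauto
    have h1 : ¬((PySem.Set.ofList tg).length ≠ tg.length
        ∨ ¬(tg.all (fun v => decide (0 ≤ v ∧ v < 8)) = true)) := by
      push Not
      refine ⟨(dls_setlen_iff tg).2 hval.1, ?_⟩
      rw [List.all_eq_true]
      intro v hv
      exact decide_eq_true (hval.2 v hv)
    rw [if_neg h1, if_pos hlim]
  · have h1 : (PySem.Set.ofList tg).length ≠ tg.length
        ∨ ¬(tg.all (fun v => decide (0 ≤ v ∧ v < 8)) = true) := by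
      rw [dlsValid, not_and_or] at hval
      rcases hval with h2 | h2
      · exact Or.inl (fun he => h2 ((dls_setlen_iff tg).1 he))
      · right
        rw [List.all_eq_true]
        push Not at h2 ⊢
        obtain ⟨v, hv, hb⟩ := h2
        exact ⟨v, hv, by simpa using hb⟩
    rw [if_pos h1]

theorem dls_main (tg : List Int) (limit : Int) : dls_target tg limit = dls_target_alt tg limit := by
  have hinv0 : dlsInv limit ((∅ : DlsPar).insert [] none) := by
    refine ⟨dls_nodup_keys _, ?_, ?_⟩
    · exact dls_get?_insert_self _ _ _
    · intro k hk hkne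
      rcases (dls_mem_keys_insert _ _ _ _).1 hk with rfl | hk'
      · exact absurd rfl hkne
      · rw [Std.HashMap.keys_empty] at hk'
        simp at hk'
  have hsok0 : dlsStackOK limit ((∅ : DlsPar).insert [] none) [([], 0)] := by
    intro p d hp
    simp at hp
    obtain ⟨rfl, rfl⟩ := hp
    exact ⟨(dls_mem_keys_insert _ _ _ _).2 (Or.inl rfl), by simp, dlsValid_nil, fun h => h⟩
  have hJ0 : dlsJ tg limit ((∅ : DlsPar).insert [] none) [([], 0)] := by
    refine Or.inr (fun k hk hkt hkl => ?_)
    rcases (dls_mem_keys_insert _ _ _ _).1 hk with rfl | hk'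
    · exact Or.inl (by simp)
    · rw [Std.HashMap.keys_empty] at hk'
      simp at hk'
  have hsize0 : ((∅ : DlsPar).insert [] none).size = 1 := by
    rw [dls_size_insert, if_neg (by simp [Std.HashMap.contains_empty])]
    simp [Std.HashMap.size_empty]
  have hfuel0 : ([([], (0:Int))] : List (List Int × Int)).length
      + (43046721 - ((∅ : DlsPar).insert [] none).size) ≤ 43046721 := by
    rw [hsize0]; simp
  obtain ⟨m, i, j⟩ := dlsLoop_spec tg limit 43046721 [([], 0)]
    ((∅ : DlsPar).insert [] none) hinv0 hsok0 hJ0 hfuel0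
  set par := dlsLoop tg limit 43046721 [([], 0)] ((∅ : DlsPar).insert [] none) with hpar
  by_cases hgood : dlsValid tg ∧ ¬(0 ≤ limit ∧ limit < (tg.length : Int))
  · have hl : 0 ≤ limit → (tg.length : Int) ≤ limit := by
      intro h0
      by_contra hc
      exact hgood.2 ⟨h0, by omega⟩
    have htg : tg ∈ par.keys := dls_complete tg limit par i j hgood.1 hl
    have hcon : par.contains tg = true := (dls_contains_iff_mem_keys par tg).2 htg
    rw [dls_target]
    simp only [hpar.symm ▸ hcon, if_true]
    rw [dlsPath_spec par limit i tg.length tg rfl htg []]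
    rw [dls_alt_eq_pos tg limit hgood.1 hgood.2]
    rw [List.nil_append, List.reverse_reverse]
    apply List.map_congr_left
    intro k hk
    have hk' : k ≤ tg.length := Nat.lt_succ_iff.1 (List.mem_range.1 hk)
    have hlen8 : tg.length ≤ 8 := dlsValid_len_le tg hgood.1
    have htl : (tg.take k).length = k := by simp; omega
    rw [dlsFill_eq (tg.take k) (by omega), htl]
  · have htg : tg ∉ par.keys := by
      intro hmem
      by_cases h0 : tg = []
      · subst h0
        refine hgood ⟨dlsValid_nil, ?_⟩
        rintro ⟨h1, h2⟩
        simp at h2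
        omega
      · obtain ⟨_, _, hv, hlk⟩ := i.2.2 tg hmem h0
        exact hgood ⟨hv, fun ⟨h1, h2⟩ => by have := hlk h1; omega⟩
    have hcon : par.contains tg = false := by
      by_contra hc
      simp at hc
      exact htg ((dls_contains_iff_mem_keys par tg).1 hc)
    rw [dls_target]
    simp only [hpar.symm ▸ hcon]
    rw [dls_alt_eq_neg tg limit hgood]
    simp

-- ===== VERDICT (by name: the statement is the Claim_ definition above) =====
theorem dls_target_spec : Claim_equal_dls_target := by
  intro tg limit _
  exact dls_main tg limit
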